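-- pv_equiv track=rewrite | github.com/kktsubota/compe | atcoder/grand_contest/039_20191008/a.py | count
-- ===== SOURCE A (Python) =====
-- def count(s):
--     s = list(s)
--     cnt = 0
--     for i in range(1, len(s)):
--         if s[i] == s[i-1]:
--             s[i] = '*'
--             cnt += 1
--     return cnt
-- ===== SOURCE B (Python) =====
-- def count(s):
--     total = 0
--     i = 0
--     n = len(s)
--     while i < n:
--         j = i
--         while j < n and s[j] == s[i]:
--             j += 1
--         total += (j - i) // 2
--         i = j
--     return total
-- ===== Notes on version B (the rewrite author's own statement) =====
-- stated objective: alternative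
-- what changed: B replaces A's in-place marking loop (list copy, index scan, overwriting matched cells with a marker) by a run-decomposition scan that jumps over each maximal run of equal characters and sums floor(run_length/2), never mutating anything.
-- intended difference: On strings that contain an asterisk run of length >= 3, or an asterisk right after an even-length maximal run of another character, A's in-band replacement marker (an asterisk) collides with the literal data and A returns an inflated count (witness '***' -> 2), while B returns the intended number of replaced adjacent duplicates ('***' -> 1). — e.g. on count("***"): A returns 2, B returns 1
import Mathlib
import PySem

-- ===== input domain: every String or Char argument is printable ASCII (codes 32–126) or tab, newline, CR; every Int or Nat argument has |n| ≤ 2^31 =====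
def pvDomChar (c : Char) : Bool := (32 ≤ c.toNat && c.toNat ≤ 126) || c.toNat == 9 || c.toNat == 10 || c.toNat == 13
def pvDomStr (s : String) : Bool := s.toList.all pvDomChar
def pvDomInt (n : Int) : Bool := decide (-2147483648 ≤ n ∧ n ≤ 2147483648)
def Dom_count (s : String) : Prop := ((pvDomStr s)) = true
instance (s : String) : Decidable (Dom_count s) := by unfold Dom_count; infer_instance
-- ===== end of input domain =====

-- B replaces A's in-place marking loop by a run-decomposition scan (sum of ⌊run/2⌋ per maximal run);
-- on strings where A's '*' marker collides with literal '*' characters, B returns the intended count (see D_count).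

-- ===== PORT A =====
-- literal port of A: s = list(s); for i in range(1, len(s)): if s[i] == s[i-1]: s[i] = '*'; cnt += 1
def count (s : String) : Int :=
  (((PySem.List.pyRange 1 (s.toList.length : Int) 1).foldl
      (fun (st : List Char × Int) (i : Int) =>
        if PySem.List.pyGet? st.1 i == PySem.List.pyGet? st.1 (i - 1) then
          (PySem.List.pySetD st.1 i '*', st.2 + 1)
        else st)
      (s.toList, (0 : Int)))).2

-- ===== PORT B =====
-- port of Source B's scan: position in the list plays i/j, (c, n) is the current run's character and length
-- (j - i); at a run boundary add (j - i) // 2 and start the next run — the direct transcription of the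
-- two while loops of Source B
def countRun (c : Char) (n : Nat) : List Char → Int
  | [] => PySem.Int.floordiv ((n : Int)) 2
  | d :: t =>
      if d == c then countRun c (n + 1) t
      else PySem.Int.floordiv ((n : Int)) 2 + countRun d 1 t

def count_alt (s : String) : Int :=
  match s.toList with
  | [] => 0
  | c :: t => countRun c 1 t

-- ===== PRECONDITION & SPEC =====
-- A marks a replaced character with '*'; on strings that already contain '*' the marker collides with the
-- data and A over-counts; D_count states exactly those inputs: a run of ≥ 3 stars, or an even-length maximal
-- run immediately followed by '*'; there A returns the inflated count and B the intended number of replacements.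
-- (decided by a linear inspection of the input: a "***" substring test plus a fold that carries only the
-- previous character and the parity of the current run; Dl/D_count_iff below restate it in index form)
def scanStep (acc : Bool × Option Char × Bool) (ch : Char) : Bool × Option Char × Bool :=
  if acc.2.1 = some ch then (acc.1, acc.2.1, !acc.2.2)
  else (acc.1 || (decide (ch = '*') && acc.2.2), some ch, false)

def starScan (l : List Char) : Bool := (l.foldl scanStep (false, none, false)).1

def D_count (s : String) : Prop :=
  (PySem.Chars.isIn ['*', '*', '*'] s.toList || starScan s.toList) = true
instance (s : String) : Decidable (D_count s) := by unfold D_count; infer_instance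

def Spec_count (s : String) (out : Int) : Prop := ¬ D_count s → out = count_alt s
instance (s : String) (out : Int) : Decidable (Spec_count s out) := by unfold Spec_count; infer_instance

def pvDiffWitness_count : String := "***"
def pvDiffWitnessOut_count : Int × Int := (2, 1)

-- ===== CLAIM (what is proved, stated in full; the proofs are below) =====
def Claim_unchanged_count : Prop := ∀ (s : String), Dom_count s → Spec_count s (count s)
def Claim_changed_count : Prop := Dom_count (pvDiffWitness_count) ∧ D_count (pvDiffWitness_count) ∧ count (pvDiffWitness_count) = pvDiffWitnessOut_count.1 ∧ count_alt (pvDiffWitness_count) = pvDiffWitnessOut_count.2 ∧ pvDiffWitnessOut_count.1 ≠ pvDiffWitnessOut_count.2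
def Claim_exact_count : Prop := ∀ (s : String), Dom_count s → D_count s → count s ≠ count_alt s

-- ===== LEMMAS AND PROOFS =====

-- the same condition as D_count, on the character list (proof-side only)
def Dl (l : List Char) : Prop :=
  (∃ i < l.length, l[i]? = some '*' ∧ l[i+1]? = some '*' ∧ l[i+2]? = some '*')
  ∨ (∃ i < l.length, ∃ m ≤ l.length, m ≠ 0 ∧ m % 2 = 0 ∧
      l[i+m]? = some '*' ∧ l[i+m-1]? ≠ some '*' ∧
      (∀ k < m, l[i+k]? = l[i+m-1]?) ∧ (i = 0 ∨ l[i-1]? ≠ l[i+m-1]?))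

-- A's loop, rephrased with the mutated cell carried as "previous character" state
def aGo : Option Char → List Char → Int
  | _, [] => 0
  | p, c :: t => if p = some c then 1 + aGo (some '*') t else aGo (some c) t

theorem L1 (m : Nat) : ∀ (l : List Char) (cnt : Int) (k : Nat), 1 ≤ k → l.length ≤ k + m →
    ((PySem.List.pyRange (k : Int) (l.length : Int) 1).foldl
      (fun (st : List Char × Int) (i : Int) =>
        if PySem.List.pyGet? st.1 i == PySem.List.pyGet? st.1 (i - 1) then
          (PySem.List.pySetD st.1 i '*', st.2 + 1)
        else st)
      (l, cnt)).2 = cnt + aGo (l[k-1]?) (l.drop k) := by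
  induction m with
  | zero =>
    intro l cnt k hk hlen
    rw [PySem.List.pyRange_one_eq_nil (by exact_mod_cast hlen)]
    rw [List.drop_eq_nil_of_le (by omega)]
    simp [aGo]
  | succ m ih =>
    intro l cnt k hk hlen
    by_cases hkl : l.length ≤ k
    · rw [PySem.List.pyRange_one_eq_nil (by exact_mod_cast hkl)]
      rw [List.drop_eq_nil_of_le hkl]
      simp [aGo]
    · push Not at hkl
      rw [PySem.List.pyRange_one_cons (by exact_mod_cast hkl)]
      rw [List.foldl_cons]
      have hget : PySem.List.pyGet? l (k : Int) = some (l[k]'hkl) := by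
        rw [PySem.List.pyGet?_natCast]; exact List.getElem?_eq_getElem hkl
      have hk1 : ((k : Int) - 1) = ((k - 1 : Nat) : Int) := by omega
      have hk1l : k - 1 < l.length := by omega
      have hget1 : PySem.List.pyGet? l ((k : Int) - 1) = some (l[k-1]'hk1l) := by
        rw [hk1, PySem.List.pyGet?_natCast]; exact List.getElem?_eq_getElem hk1l
      have hdropk : l.drop k = l[k]'hkl :: l.drop (k+1) := List.drop_eq_getElem_cons hkl
      have hgetk1 : l[k-1]? = some (l[k-1]'hk1l) := List.getElem?_eq_getElem hk1l
      simp only [hget, hget1]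
      by_cases heq : l[k]'hkl = l[k-1]'hk1l
      · rw [if_pos (by simp [heq])]
        have hsetcast : PySem.List.pySetD l (k : Int) '*' = l.set k '*' :=
          PySem.List.pySetD_natCast l k '*'
        rw [hsetcast]
        have hlen' : (l.set k '*').length = l.length := List.length_set ..
        have := ih (l.set k '*') (cnt + 1) (k + 1) (by omega) (by rw [hlen']; omega)
        rw [hlen'] at this
        rw [show ((k : Int) + 1) = ((k + 1 : Nat) : Int) by push_cast; ring, this]
        have hd : (l.set k '*').drop (k+1) = l.drop (k+1) := by rw [List.drop_set]; simp
        have hg : (l.set k '*')[k+1-1]? = some '*' := by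
          simpa using List.getElem?_set_self (l := l) (a := '*') hkl
        rw [hd, hg, hdropk, hgetk1]
        rw [show aGo (some (l[k-1]'hk1l)) (l[k]'hkl :: l.drop (k+1))
              = 1 + aGo (some '*') (l.drop (k+1)) by simp [aGo, heq]]
        ring
      · rw [if_neg (by simp [heq])]
        have := ih l cnt (k + 1) (by omega) (by omega)
        rw [show ((k : Int) + 1) = ((k + 1 : Nat) : Int) by push_cast; ring, this]
        have hg : l[k+1-1]? = some (l[k]'hkl) := by
          simp only [Nat.add_sub_cancel]
          exact List.getElem?_eq_getElem hkl
        rw [hg, hdropk, hgetk1]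
        rw [show aGo (some (l[k-1]'hk1l)) (l[k]'hkl :: l.drop (k+1))
              = aGo (some (l[k]'hkl)) (l.drop (k+1)) by
            simp only [aGo]
            rw [if_neg (by intro h; exact heq (Option.some.inj h).symm)]]

theorem aGo_zero (l : List Char) : aGo (l[0]?) (l.drop 1) = aGo none l := by
  cases l with
  | nil => rfl
  | cons c t => simp [aGo]

theorem count_eq_aGo (s : String) : count s = aGo none s.toList := by
  unfold count
  have := L1 s.toList.length s.toList 0 1 le_rfl (by omega)
  rw [show ((1 : Nat) : Int) = 1 from by norm_num] at this
  rw [this]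
  rw [show (1 - 1 : Nat) = 0 from rfl, aGo_zero]
  ring

-- B on the list side
def bGo : List Char → Int
  | [] => 0
  | c :: t => countRun c 1 t

theorem count_alt_eq (s : String) : count_alt s = bGo s.toList := by
  unfold count_alt bGo; rfl

theorem floordiv_two_natCast (m : Nat) :
    PySem.Int.floordiv ((m : Int)) 2 = ((m / 2 : Nat) : Int) := by
  exact_mod_cast PySem.Int.floordiv_natCast m 2

theorem countRun_eq (t : List Char) : ∀ (c : Char) (n : Nat),
    countRun c n t = (((n + (t.takeWhile (fun d => d == c)).length) / 2 : Nat) : Int)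
                     + bGo (t.dropWhile (fun d => d == c)) := by
  induction t with
  | nil => intro c n; simp [countRun, bGo]
  | cons d t ih =>
    intro c n
    by_cases h : d = c
    · subst h
      simp only [countRun, List.takeWhile_cons, List.dropWhile_cons, BEq.rfl, if_true]
      rw [ih d (n + 1)]
      congr 2
      simp [Nat.add_assoc, Nat.add_comm 1]
    · have hb : (d == c) = false := by simp [h]
      simp only [countRun, List.takeWhile_cons, List.dropWhile_cons, hb, if_false,
        Bool.false_eq_true, floordiv_two_natCast]
      simp [bGo]

theorem RL_nonstar (u : List Char) (c : Char) (hc : c ≠ '*') :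
    ∀ (n : Nat) (p : Option Char), 1 ≤ n → p ≠ some c →
    aGo p (List.replicate n c ++ u)
      = ((n / 2 : Nat) : Int) + aGo (some (if n % 2 = 1 then c else '*')) u := by
  intro n
  induction n using Nat.strong_induction_on with
  | _ n ih =>
    intro p hn hp
    match n, hn with
    | 1, _ =>
      simp [aGo, hp]
    | (m+2), _ =>
      have hstarne : (some '*' : Option Char) ≠ some c := by
        intro h; exact hc (Option.some.inj h).symm
      simp only [List.replicate_succ, List.cons_append]
      rw [show aGo p (c :: (c :: (List.replicate m c ++ u))) =
            aGo (some c) (c :: (List.replicate m c ++ u)) by simp [aGo, hp]]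
      rw [show aGo (some c) (c :: (List.replicate m c ++ u)) =
            1 + aGo (some '*') (List.replicate m c ++ u) by simp [aGo]]
      rcases Nat.eq_zero_or_pos m with hm | hm
      · subst hm; simp
      · rw [ih m (by omega) (some '*') hm hstarne]
        have h1 : (m + 2) / 2 = m / 2 + 1 := by omega
        have h2 : (m + 2) % 2 = m % 2 := by omega
        rw [h1, h2]; push_cast; ring

theorem RL_star (u : List Char) :
    ∀ (m : Nat) (p : Option Char), 1 ≤ m →
    aGo p (List.replicate m '*' ++ u)
      = (if p = some '*' then (m : Int) else (m : Int) - 1) + aGo (some '*') u := by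
  intro m
  induction m with
  | zero => intro p h; omega
  | succ m ih =>
    intro p _
    rcases Nat.eq_zero_or_pos m with hm | hm
    · subst hm
      by_cases hp : p = some '*' <;> simp [aGo, hp]
    · simp only [List.replicate_succ, List.cons_append]
      by_cases hp : p = some '*'
      · rw [show aGo p ('*' :: (List.replicate m '*' ++ u)) =
              1 + aGo (some '*') (List.replicate m '*' ++ u) by simp [aGo, hp]]
        rw [ih (some '*') hm]
        simp only [if_pos hp]
        push_cast; ring
      · rw [show aGo p ('*' :: (List.replicate m '*' ++ u)) =
              aGo (some '*') (List.replicate m '*' ++ u) by simp [aGo, hp]]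
        rw [ih (some '*') hm]
        simp only [if_neg hp]
        push_cast; ring

theorem getElem?_some_lt {u : List Char} {j : Nat} {x : Char} (h : u[j]? = some x) : j < u.length :=
  (List.getElem?_eq_some_iff.mp h).1

theorem repGet_lt (n : Nat) (c : Char) (u : List Char) {j : Nat} (h : j < n) :
    (List.replicate n c ++ u)[j]? = some c := by
  rw [List.getElem?_append_left (by simpa using h)]; simp [h]

theorem repGet_ge (n : Nat) (c : Char) (u : List Char) {j : Nat} (h : n ≤ j) :
    (List.replicate n c ++ u)[j]? = u[j-n]? := by
  rw [List.getElem?_append_right (by simpa using h)]; simp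

theorem Dl_nil : ¬ Dl ([] : List Char) := by
  rintro (⟨i, hi, _⟩ | ⟨i, hi, _⟩) <;> simp at hi

theorem S1 (n : Nat) (c : Char) (u : List Char) (hn : 1 ≤ n) (hc : c ≠ '*')
    (hu : u[0]? ≠ some c) :
    Dl (List.replicate n c ++ u) ↔ Dl u ∨ (n % 2 = 0 ∧ u[0]? = some '*') := by
  have hlen : (List.replicate n c ++ u).length = n + u.length := by simp
  constructor
  · rintro (⟨i, hi, h0, h1, h2⟩ | ⟨i, hi, m, hm, hm0, hme, hstar, hcw, hrun, hmax⟩)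
    · have hin : n ≤ i := by
        by_contra hcon
        push Not at hcon
        rw [repGet_lt n c u hcon] at h0
        exact hc (Option.some.inj h0)
      rw [repGet_ge n c u hin] at h0
      rw [repGet_ge n c u (by omega)] at h1
      rw [repGet_ge n c u (by omega)] at h2
      rw [show i + 1 - n = (i - n) + 1 from by omega] at h1
      rw [show i + 2 - n = (i - n) + 2 from by omega] at h2
      exact Or.inl (Or.inl ⟨i - n, getElem?_some_lt h0, h0, h1, h2⟩)
    · have hiM : n ≤ i + m := by
        by_contra hcon; push Not at hcon
        rw [repGet_lt n c u hcon] at hstar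
        exact hc (Option.some.inj hstar)
      by_cases hiln : i < n
      · by_cases hend : i + m = n
        · have hizero : i = 0 := by
            rcases hmax with h' | h'
            · exact h'
            · exfalso
              exact h' ((repGet_lt n c u (j := i - 1) (by omega)).trans
                (repGet_lt n c u (j := i + m - 1) (by omega)).symm)
          right
          refine ⟨by omega, ?_⟩
          have := hstar
          rw [repGet_ge n c u (by omega), show i + m - n = 0 from by omega] at this
          exact this
        · exfalso
          have hk0 := hrun 0 (by omega)
          rw [Nat.add_zero, repGet_lt n c u hiln] at hk0
          have hkn := hrun (n - i) (by omega)
          rw [show i + (n - i) = n from by omega, repGet_ge n c u le_rfl,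
            Nat.sub_self] at hkn
          exact hu (hkn.trans hk0.symm)
      · push Not at hiln
        left; right
        refine ⟨i - n, by rw [hlen] at hi; omega, m, ?_, hm0, hme, ?_, ?_, ?_, ?_⟩
        · have := hstar
          rw [repGet_ge n c u (by omega)] at this
          have := getElem?_some_lt this
          omega
        · have := hstar; rw [repGet_ge n c u (by omega)] at this
          rw [show i + m - n = (i - n) + m from by omega] at this; exact this
        · have := hcw; rw [repGet_ge n c u (j := i + m - 1) (by omega)] at this
          rw [show i + m - 1 - n = (i - n) + m - 1 from by omega] at this; exact this
        · intro k hk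
          have := hrun k hk
          rw [repGet_ge n c u (j := i + k) (by omega),
            repGet_ge n c u (j := i + m - 1) (by omega),
            show i + k - n = (i - n) + k from by omega,
            show i + m - 1 - n = (i - n) + m - 1 from by omega] at this
          exact this
        · by_cases hieq : i = n
          · left; omega
          · right
            rcases hmax with h' | h'
            · omega
            · rw [repGet_ge n c u (j := i - 1) (by omega),
                repGet_ge n c u (j := i + m - 1) (by omega),
                show i - 1 - n = (i - n) - 1 from by omega,
                show i + m - 1 - n = (i - n) + m - 1 from by omega] at h'
              exact h'
  · rintro ((⟨i, hi, h0, h1, h2⟩ | ⟨i, hi, m, hm, hm0, hme, hstar, hcw, hrun, hmax⟩) | ⟨hpar, hustar⟩)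
    · left
      refine ⟨n + i, by rw [hlen]; omega, ?_, ?_, ?_⟩
      · rw [repGet_ge n c u (by omega), show n + i - n = i from by omega]; exact h0
      · rw [repGet_ge n c u (by omega), show n + i + 1 - n = i + 1 from by omega]; exact h1
      · rw [repGet_ge n c u (by omega), show n + i + 2 - n = i + 2 from by omega]; exact h2
    · right
      refine ⟨n + i, by rw [hlen]; omega, m, by rw [hlen]; omega, hm0, hme, ?_, ?_, ?_, ?_⟩
      · rw [repGet_ge n c u (by omega), show n + i + m - n = i + m from by omega]; exact hstar
      · rw [repGet_ge n c u (j := n + i + m - 1) (by omega),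
          show n + i + m - 1 - n = i + m - 1 from by omega]; exact hcw
      · intro k hk
        rw [repGet_ge n c u (j := n + i + k) (by omega),
          show n + i + k - n = i + k from by omega,
          repGet_ge n c u (j := n + i + m - 1) (by omega),
          show n + i + m - 1 - n = i + m - 1 from by omega]
        exact hrun k hk
      · right
        by_cases hizero : i = 0
        · rw [show n + i - 1 = n - 1 from by omega, repGet_lt n c u (by omega),
            repGet_ge n c u (j := n + i + m - 1) (by omega),
            show n + i + m - 1 - n = i + m - 1 from by omega]
          have h00 := hrun 0 (by omega)
          rw [Nat.add_zero] at h00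
          intro hEq
          apply hu
          rw [show (0 : Nat) = i from hizero.symm, h00, ← hEq]
        · rw [show n + i - 1 = n + (i - 1) from by omega,
            repGet_ge n c u (j := n + (i - 1)) (by omega),
            show n + (i - 1) - n = i - 1 from by omega,
            repGet_ge n c u (j := n + i + m - 1) (by omega),
            show n + i + m - 1 - n = i + m - 1 from by omega]
          rcases hmax with h' | h'
          · exact absurd h' hizero
          · exact h'
    · right
      refine ⟨0, by rw [hlen]; omega, n, by rw [hlen]; omega, by omega, hpar, ?_, ?_, ?_, Or.inl rfl⟩
      · rw [Nat.zero_add, repGet_ge n c u le_rfl, Nat.sub_self]; exact hustar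
      · rw [Nat.zero_add, repGet_lt n c u (by omega)]
        intro hEq; exact hc (Option.some.inj hEq)
      · intro k hk
        rw [Nat.zero_add, Nat.zero_add, repGet_lt n c u (by omega),
          repGet_lt n c u (j := n - 1) (by omega)]

theorem S2 (n : Nat) (u : List Char) (hn : 1 ≤ n) (hu : u[0]? ≠ some '*') :
    Dl (List.replicate n '*' ++ u) ↔ Dl u ∨ 3 ≤ n := by
  have hlen : (List.replicate n '*' ++ u).length = n + u.length := by simp
  constructor
  · rintro (⟨i, hi, h0, h1, h2⟩ | ⟨i, hi, m, hm, hm0, hme, hstar, hcw, hrun, hmax⟩)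
    · by_cases h3 : i + 2 < n
      · right; omega
      · have hin : n ≤ i := by
          by_contra hcon
          push Not at hcon
          -- n ∈ {i+1, i+2}: the character at position n would be '*', contradicting hu
          rcases (by omega : n = i + 1 ∨ n = i + 2) with hn' | hn'
          · rw [repGet_ge n '*' u (by omega), show i + 1 - n = 0 from by omega] at h1
            exact hu h1
          · rw [repGet_ge n '*' u (by omega), show i + 2 - n = 0 from by omega] at h2
            exact hu h2
        have hgt : n < i := by
          rcases Nat.lt_or_ge n i with h | h
          · exact h
          · exfalso
            have : i = n := by omega
            rw [repGet_ge n '*' u (by omega), show i - n = 0 from by omega] at h0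
            exact hu h0
        left; left
        rw [repGet_ge n '*' u (by omega)] at h0
        rw [repGet_ge n '*' u (by omega), show i + 1 - n = (i - n) + 1 from by omega] at h1
        rw [repGet_ge n '*' u (by omega), show i + 2 - n = (i - n) + 2 from by omega] at h2
        exact ⟨i - n, getElem?_some_lt h0, h0, h1, h2⟩
    · have hend : n ≤ i + m - 1 := by
        by_contra hcon; push Not at hcon
        exact hcw (repGet_lt n '*' u (by omega))
      have hin : n ≤ i := by
        by_contra hcon
        push Not at hcon
        have hk := hrun (n - 1 - i) (by omega)
        rw [show i + (n - 1 - i) = n - 1 from by omega, repGet_lt n '*' u (by omega)] at hk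
        exact hcw hk.symm
      left; right
      refine ⟨i - n, by rw [hlen] at hi; omega, m, ?_, hm0, hme, ?_, ?_, ?_, ?_⟩
      · have := hstar
        rw [repGet_ge n '*' u (by omega)] at this
        have := getElem?_some_lt this
        omega
      · have := hstar; rw [repGet_ge n '*' u (by omega),
          show i + m - n = (i - n) + m from by omega] at this; exact this
      · have := hcw; rw [repGet_ge n '*' u (j := i + m - 1) (by omega),
          show i + m - 1 - n = (i - n) + m - 1 from by omega] at this; exact this
      · intro k hk
        have := hrun k hk
        rw [repGet_ge n '*' u (j := i + k) (by omega),
          repGet_ge n '*' u (j := i + m - 1) (by omega),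
          show i + k - n = (i - n) + k from by omega,
          show i + m - 1 - n = (i - n) + m - 1 from by omega] at this
        exact this
      · by_cases hieq : i = n
        · left; omega
        · right
          rcases hmax with h' | h'
          · omega
          · rw [repGet_ge n '*' u (j := i - 1) (by omega),
              repGet_ge n '*' u (j := i + m - 1) (by omega),
              show i - 1 - n = (i - n) - 1 from by omega,
              show i + m - 1 - n = (i - n) + m - 1 from by omega] at h'
            exact h'
  · rintro ((⟨i, hi, h0, h1, h2⟩ | ⟨i, hi, m, hm, hm0, hme, hstar, hcw, hrun, hmax⟩) | h3)
    · left
      refine ⟨n + i, by rw [hlen]; omega, ?_, ?_, ?_⟩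
      · rw [repGet_ge n '*' u (by omega), show n + i - n = i from by omega]; exact h0
      · rw [repGet_ge n '*' u (by omega), show n + i + 1 - n = i + 1 from by omega]; exact h1
      · rw [repGet_ge n '*' u (by omega), show n + i + 2 - n = i + 2 from by omega]; exact h2
    · right
      refine ⟨n + i, by rw [hlen]; omega, m, by rw [hlen]; omega, hm0, hme, ?_, ?_, ?_, ?_⟩
      · rw [repGet_ge n '*' u (by omega), show n + i + m - n = i + m from by omega]; exact hstar
      · rw [repGet_ge n '*' u (j := n + i + m - 1) (by omega),
          show n + i + m - 1 - n = i + m - 1 from by omega]; exact hcw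
      · intro k hk
        rw [repGet_ge n '*' u (j := n + i + k) (by omega),
          show n + i + k - n = i + k from by omega,
          repGet_ge n '*' u (j := n + i + m - 1) (by omega),
          show n + i + m - 1 - n = i + m - 1 from by omega]
        exact hrun k hk
      · right
        by_cases hizero : i = 0
        · rw [show n + i - 1 = n - 1 from by omega, repGet_lt n '*' u (by omega),
            repGet_ge n '*' u (j := n + i + m - 1) (by omega),
            show n + i + m - 1 - n = i + m - 1 from by omega]
          intro hEq; exact hcw hEq.symm
        · rw [show n + i - 1 = n + (i - 1) from by omega,
            repGet_ge n '*' u (j := n + (i - 1)) (by omega),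
            show n + (i - 1) - n = i - 1 from by omega,
            repGet_ge n '*' u (j := n + i + m - 1) (by omega),
            show n + i + m - 1 - n = i + m - 1 from by omega]
          rcases hmax with h' | h'
          · exact absurd h' hizero
          · exact h'
    · left
      refine ⟨0, by rw [hlen]; omega, ?_, ?_, ?_⟩
      · exact repGet_lt n '*' u (by omega)
      · exact repGet_lt n '*' u (by omega)
      · exact repGet_lt n '*' u (by omega)

def entryOK (p : Option Char) (l : List Char) : Prop :=
  ∀ c, l.head? = some c → c ≠ '*' → p ≠ some c

theorem dropWhile_zero_ne (c : Char) : ∀ t : List Char, (t.dropWhile (fun d => d == c))[0]? ≠ some c := by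
  intro t
  induction t with
  | nil => simp
  | cons d t ih =>
    by_cases h : d = c
    · simpa [List.dropWhile_cons, h] using ih
    · simp [h]

theorem KEY : ∀ (N : Nat) (l : List Char) (p : Option Char), l.length ≤ N → entryOK p l →
    bGo l ≤ aGo p l ∧
      (aGo p l = bGo l ↔ (¬ Dl l ∧ ¬ (p = some '*' ∧ l.head? = some '*'))) := by
  intro N
  induction N with
  | zero =>
    intro l p hl _
    have : l = [] := List.eq_nil_of_length_eq_zero (by omega)
    subst this
    exact ⟨le_refl _, ⟨fun _ => ⟨Dl_nil, by simp⟩, fun _ => rfl⟩⟩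
  | succ N ih =>
    intro l p hl hOK
    cases l with
    | nil => exact ⟨le_refl _, ⟨fun _ => ⟨Dl_nil, by simp⟩, fun _ => rfl⟩⟩
    | cons c t =>
      obtain ⟨k, htw⟩ : ∃ k, t.takeWhile (fun d => d == c) = List.replicate k c :=
        ⟨_, by
          rw [List.eq_replicate_iff]
          exact ⟨rfl, fun b hb => by simpa using List.mem_takeWhile_imp hb⟩⟩
      have hsplit : c :: t = List.replicate (k+1) c ++ t.dropWhile (fun d => d == c) := by
        rw [List.replicate_succ, List.cons_append, ← htw, List.takeWhile_append_dropWhile]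
      have hu0 : (t.dropWhile (fun d => d == c))[0]? ≠ some c := dropWhile_zero_ne c t
      have hulen : (t.dropWhile (fun d => d == c)).length ≤ N := by
        have h1 := List.length_dropWhile_le (fun d => d == c) t
        have h2 : t.length + 1 ≤ N + 1 := by simpa using hl
        omega
      have hbGo : bGo (c :: t)
          = (((k+1) / 2 : Nat) : Int) + bGo (t.dropWhile (fun d => d == c)) := by
        show countRun c 1 t = _
        rw [countRun_eq t c 1,
          show (t.takeWhile (fun d => d == c)).length = k by rw [htw, List.length_replicate],
          Nat.add_comm 1 k]
      generalize hgen : t.dropWhile (fun d => d == c) = u at hsplit hu0 hulen hbGo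
      simp only [List.head?_cons]
      rw [hbGo, hsplit]
      by_cases hcs : c = '*'
      · subst hcs
        rw [RL_star u (k+1) p (by omega)]
        rw [S2 (k+1) u (by omega) hu0]
        obtain ⟨ihle, ihiff⟩ := ih u (some '*') hulen
          (fun d hd hdne hEq => hdne (Option.some.inj hEq).symm)
        have hustar : u.head? ≠ some '*' := by rw [List.head?_eq_getElem?]; exact hu0
        have hiff2 : aGo (some '*') u = bGo u ↔ ¬ Dl u := by
          rw [ihiff]; simp [hustar]
        constructor
        · split_ifs with hps <;> omega
        · constructor
          · intro hEq
            split_ifs at hEq with hps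
            · exfalso; omega
            · have hAB : aGo (some '*') u = bGo u ∧ k + 1 ≤ 2 := by
                constructor <;> omega
              refine ⟨?_, ?_⟩
              · rintro (hDu | h3)
                · exact (hiff2.mp hAB.1) hDu
                · omega
              · rintro ⟨hps', _⟩; exact hps hps'
          · rintro ⟨hnD, hnp⟩
            have hps : p ≠ some '*' := fun h => hnp ⟨h, rfl⟩
            rw [if_neg hps]
            have hk2 : k + 1 ≤ 2 := by
              by_contra h; exact hnD (Or.inr (by omega))
            have hABe : aGo (some '*') u = bGo u :=
              hiff2.mpr (fun h => hnD (Or.inl h))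
            omega
      · have hp : p ≠ some c := hOK c rfl hcs
        rw [RL_nonstar u c hcs (k+1) p (by omega) hp]
        rw [S1 (k+1) c u (by omega) hcs hu0]
        have hpe_ok : entryOK (some (if (k+1) % 2 = 1 then c else '*')) u := by
          intro d hd hdne hEq
          have hinj := Option.some.inj hEq
          split_ifs at hinj with hpar
          · apply hu0
            rw [← List.head?_eq_getElem?, hd, ← hinj]
          · exact hdne hinj.symm
        obtain ⟨ihle, ihiff⟩ := ih u _ hulen hpe_ok
        have hpe_star : (some (if (k+1) % 2 = 1 then c else '*') = some '*') ↔ (k+1) % 2 = 0 := by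
          split_ifs with hpar
          · constructor
            · intro h; exact absurd (Option.some.inj h) hcs
            · intro h; omega
          · constructor
            · intro _; omega
            · intro _; rfl
        have hhead : u.head? = u[0]? := List.head?_eq_getElem?
        constructor
        · omega
        · rw [add_right_inj, ihiff]
          constructor
          · rintro ⟨h1, h2⟩
            refine ⟨?_, ?_⟩
            · rintro (hDu | ⟨hpar, hstar⟩)
              · exact h1 hDu
              · exact h2 ⟨hpe_star.mpr hpar, by rw [hhead]; exact hstar⟩
            · rintro ⟨_, hcc⟩; exact hcs (Option.some.inj hcc)
          · rintro ⟨h1, _⟩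
            refine ⟨fun h => h1 (Or.inl h), ?_⟩
            rintro ⟨hpe', hh⟩
            exact h1 (Or.inr ⟨hpe_star.mp hpe', by rw [← hhead]; exact hh⟩)

theorem infix3_iff (l : List Char) : (PySem.Chars.isIn ['*', '*', '*'] l = true) ↔
    (∃ i < l.length, l[i]? = some '*' ∧ l[i+1]? = some '*' ∧ l[i+2]? = some '*') := by
  rw [PySem.Chars.isIn_iff_infix]
  constructor
  · rintro ⟨s, t, rfl⟩
    rw [List.append_assoc]
    have hx : ∀ j, (s ++ (['*', '*', '*'] ++ t))[s.length + j]? = (['*', '*', '*'] ++ t)[j]? := by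
      intro j
      rw [List.getElem?_append_right (by omega)]
      congr 1
      omega
    refine ⟨s.length, by simp, ?_, ?_, ?_⟩
    · have := hx 0
      rw [Nat.add_zero] at this
      rw [this]; rfl
    · rw [hx 1]; rfl
    · rw [hx 2]; rfl
  · rintro ⟨i, hi, h0, h1, h2⟩
    obtain ⟨hi2, hv2⟩ := List.getElem?_eq_some_iff.mp h2
    obtain ⟨hi1, hv1⟩ := List.getElem?_eq_some_iff.mp h1
    obtain ⟨hi0, hv0⟩ := List.getElem?_eq_some_iff.mp h0
    refine ⟨l.take i, l.drop (i+3), ?_⟩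
    conv_rhs => rw [← List.take_append_drop i l]
    rw [List.drop_eq_getElem_cons hi0, hv0,
      show i + 1 = i + 1 from rfl, List.drop_eq_getElem_cons hi1, hv1,
      List.drop_eq_getElem_cons hi2, hv2]
    simp [List.append_assoc]

theorem scan_rep0 : ∀ (m : Nat) (c : Char) (e f : Bool),
    List.foldl scanStep (f, some c, e) (List.replicate m c) = (f, some c, e ^^ decide (m % 2 = 1)) := by
  intro m
  induction m with
  | zero => intro c e f; simp
  | succ m ihm =>
    intro c e f
    rw [List.replicate_succ, List.foldl_cons,
      show scanStep (f, some c, e) c = (f, some c, !e) from by simp [scanStep],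
      ihm]
    rcases Nat.mod_two_eq_zero_or_one m with h | h
    · rw [h, show (m + 1) % 2 = 1 from by omega]
      cases e <;> simp
    · rw [h, show (m + 1) % 2 = 0 from by omega]
      cases e <;> simp

theorem scan_flag : ∀ (l : List Char) (p : Option Char) (e f : Bool),
    List.foldl scanStep (f, p, e) l
      = (f || (List.foldl scanStep (false, p, e) l).1, (List.foldl scanStep (false, p, e) l).2) := by
  intro l
  induction l with
  | nil => intro p e f; simp
  | cons ch l ihl =>
    intro p e f
    rw [List.foldl_cons, List.foldl_cons]
    by_cases hp : p = some ch
    · rw [show scanStep (f, p, e) ch = (f, p, !e) from by simp [scanStep, hp],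
        show scanStep (false, p, e) ch = (false, p, !e) from by simp [scanStep, hp]]
      exact ihl p (!e) f
    · rw [show scanStep (f, p, e) ch
          = (f || (decide (ch = '*') && e), some ch, false) from by simp [scanStep, hp],
        show scanStep (false, p, e) ch
          = (decide (ch = '*') && e, some ch, false) from by simp [scanStep, hp]]
      rw [ihl (some ch) false (f || (decide (ch = '*') && e)),
        ihl (some ch) false (decide (ch = '*') && e)]
      rw [Bool.or_assoc]

-- clause 2 of Dl under peeling of the maximal head run
theorem C2peel (n : Nat) (c : Char) (u : List Char) (hn : 1 ≤ n) (hu : u[0]? ≠ some c) :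
    (∃ i < (List.replicate n c ++ u).length, ∃ m ≤ (List.replicate n c ++ u).length,
        m ≠ 0 ∧ m % 2 = 0 ∧
        (List.replicate n c ++ u)[i+m]? = some '*' ∧
        (List.replicate n c ++ u)[i+m-1]? ≠ some '*' ∧
        (∀ k < m, (List.replicate n c ++ u)[i+k]? = (List.replicate n c ++ u)[i+m-1]?) ∧
        (i = 0 ∨ (List.replicate n c ++ u)[i-1]? ≠ (List.replicate n c ++ u)[i+m-1]?))
      ↔ ((∃ i < u.length, ∃ m ≤ u.length, m ≠ 0 ∧ m % 2 = 0 ∧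
            u[i+m]? = some '*' ∧ u[i+m-1]? ≠ some '*' ∧
            (∀ k < m, u[i+k]? = u[i+m-1]?) ∧ (i = 0 ∨ u[i-1]? ≠ u[i+m-1]?))
          ∨ (c ≠ '*' ∧ n % 2 = 0 ∧ u[0]? = some '*')) := by
  have hlen : (List.replicate n c ++ u).length = n + u.length := by simp
  constructor
  · rintro ⟨i, hi, m, hm, hm0, hme, hstar, hcw, hrun, hmax⟩
    by_cases hiln : i < n
    · by_cases hend : i + m ≤ n
      · by_cases hend' : i + m = n
        · -- head-run case: i = 0, m = n
          have hcweq : (List.replicate n c ++ u)[i+m-1]? = some c := repGet_lt n c u (by omega)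
          have hizero : i = 0 := by
            rcases hmax with h' | h'
            · exact h'
            · exact absurd ((repGet_lt n c u (j := i - 1) (by omega)).trans hcweq.symm) h'
          right
          refine ⟨?_, by omega, ?_⟩
          · intro hcc
            exact hcw (by rw [hcweq, hcc])
          · have := hstar
            rw [repGet_ge n c u (by omega), show i + m - n = 0 from by omega] at this
            exact this
        · -- i + m < n: the '*' right after the run sits inside the replicate block
          exfalso
          have := hstar
          rw [repGet_lt n c u (by omega)] at this
          have hcc : c = '*' := Option.some.inj this
          exact hcw (by rw [repGet_lt n c u (j := i + m - 1) (by omega), hcc])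
      · -- the run crosses the block boundary: impossible
        exfalso
        push Not at hend
        have hk0 := hrun 0 (by omega)
        rw [Nat.add_zero, repGet_lt n c u hiln] at hk0
        have hkn := hrun (n - i) (by omega)
        rw [show i + (n - i) = n from by omega, repGet_ge n c u le_rfl,
          Nat.sub_self] at hkn
        exact hu (hkn.trans hk0.symm)
    · push Not at hiln
      left
      refine ⟨i - n, by rw [hlen] at hi; omega, m, ?_, hm0, hme, ?_, ?_, ?_, ?_⟩
      · have := hstar
        rw [repGet_ge n c u (by omega)] at this
        have := getElem?_some_lt this
        omega
      · have := hstar; rw [repGet_ge n c u (by omega)] at this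
        rw [show i + m - n = (i - n) + m from by omega] at this; exact this
      · have := hcw; rw [repGet_ge n c u (j := i + m - 1) (by omega)] at this
        rw [show i + m - 1 - n = (i - n) + m - 1 from by omega] at this; exact this
      · intro k hk
        have := hrun k hk
        rw [repGet_ge n c u (j := i + k) (by omega),
          repGet_ge n c u (j := i + m - 1) (by omega),
          show i + k - n = (i - n) + k from by omega,
          show i + m - 1 - n = (i - n) + m - 1 from by omega] at this
        exact this
      · by_cases hieq : i = n
        · left; omega
        · right
          rcases hmax with h' | h'
          · omega
          · rw [repGet_ge n c u (j := i - 1) (by omega),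
              repGet_ge n c u (j := i + m - 1) (by omega),
              show i - 1 - n = (i - n) - 1 from by omega,
              show i + m - 1 - n = (i - n) + m - 1 from by omega] at h'
            exact h'
  · rintro (⟨i, hi, m, hm, hm0, hme, hstar, hcw, hrun, hmax⟩ | ⟨hc, hpar, hustar⟩)
    · refine ⟨n + i, by rw [hlen]; omega, m, by rw [hlen]; omega, hm0, hme, ?_, ?_, ?_, ?_⟩
      · rw [repGet_ge n c u (by omega), show n + i + m - n = i + m from by omega]; exact hstar
      · rw [repGet_ge n c u (j := n + i + m - 1) (by omega),
          show n + i + m - 1 - n = i + m - 1 from by omega]; exact hcw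
      · intro k hk
        rw [repGet_ge n c u (j := n + i + k) (by omega),
          show n + i + k - n = i + k from by omega,
          repGet_ge n c u (j := n + i + m - 1) (by omega),
          show n + i + m - 1 - n = i + m - 1 from by omega]
        exact hrun k hk
      · right
        by_cases hizero : i = 0
        · rw [show n + i - 1 = n - 1 from by omega, repGet_lt n c u (by omega),
            repGet_ge n c u (j := n + i + m - 1) (by omega),
            show n + i + m - 1 - n = i + m - 1 from by omega]
          have h00 := hrun 0 (by omega)
          rw [Nat.add_zero] at h00
          intro hEq
          apply hu
          rw [show (0 : Nat) = i from hizero.symm, h00, ← hEq]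
        · rw [show n + i - 1 = n + (i - 1) from by omega,
            repGet_ge n c u (j := n + (i - 1)) (by omega),
            show n + (i - 1) - n = i - 1 from by omega,
            repGet_ge n c u (j := n + i + m - 1) (by omega),
            show n + i + m - 1 - n = i + m - 1 from by omega]
          rcases hmax with h' | h'
          · exact absurd h' hizero
          · exact h'
    · refine ⟨0, by rw [hlen]; omega, n, by rw [hlen]; omega, by omega, hpar, ?_, ?_, ?_, Or.inl rfl⟩
      · rw [Nat.zero_add, repGet_ge n c u le_rfl, Nat.sub_self]; exact hustar
      · rw [Nat.zero_add, repGet_lt n c u (by omega)]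
        intro hEq; exact hc (Option.some.inj hEq)
      · intro k hk
        rw [Nat.zero_add, Nat.zero_add, repGet_lt n c u (by omega),
          repGet_lt n c u (j := n - 1) (by omega)]

theorem scan_iff : ∀ (N : Nat) (l : List Char), l.length ≤ N →
    (starScan l = true ↔
      (∃ i < l.length, ∃ m ≤ l.length, m ≠ 0 ∧ m % 2 = 0 ∧
        l[i+m]? = some '*' ∧ l[i+m-1]? ≠ some '*' ∧
        (∀ k < m, l[i+k]? = l[i+m-1]?) ∧ (i = 0 ∨ l[i-1]? ≠ l[i+m-1]?))) := by
  intro N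
  induction N with
  | zero =>
    intro l hl
    have : l = [] := List.eq_nil_of_length_eq_zero (by omega)
    subst this
    constructor
    · intro h; exact absurd h (by simp [starScan])
    · rintro ⟨i, hi, _⟩; simp at hi
  | succ N ih =>
    intro l hl
    cases l with
    | nil =>
      constructor
      · intro h; exact absurd h (by simp [starScan])
      · rintro ⟨i, hi, _⟩; simp at hi
    | cons c t =>
      obtain ⟨k, htw⟩ : ∃ k, t.takeWhile (fun d => d == c) = List.replicate k c :=
        ⟨_, by
          rw [List.eq_replicate_iff]
          exact ⟨rfl, fun b hb => by simpa using List.mem_takeWhile_imp hb⟩⟩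
      have hsplit' : t = List.replicate k c ++ t.dropWhile (fun d => d == c) := by
        conv_lhs => rw [← List.takeWhile_append_dropWhile (p := fun d => d == c) (l := t)]
        rw [htw]
      have hu0 : (t.dropWhile (fun d => d == c))[0]? ≠ some c := dropWhile_zero_ne c t
      have hulen : (t.dropWhile (fun d => d == c)).length ≤ N := by
        have h1 := List.length_dropWhile_le (fun d => d == c) t
        have h2 : t.length + 1 ≤ N + 1 := by simpa using hl
        omega
      generalize hgen : t.dropWhile (fun d => d == c) = u at hsplit' hu0 hulen
      have hstep0 : starScan (c :: t) = (List.foldl scanStep (false, some c, false) t).1 := by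
        rw [starScan, List.foldl_cons,
          show scanStep (false, none, false) c = (false, some c, false) from by
            simp [scanStep]]
      rw [hstep0, hsplit', List.foldl_append, scan_rep0 k c false false, Bool.false_xor]
      rw [show c :: (List.replicate k c ++ u) = List.replicate (k+1) c ++ u from by
        rw [List.replicate_succ, List.cons_append]]
      rw [C2peel (k+1) c u (by omega) hu0]
      cases u with
      | nil =>
        simp only [List.foldl_nil]
        constructor
        · intro h; exact absurd h (by simp)
        · rintro (⟨i, hi, _⟩ | ⟨_, _, hg⟩)
          · simp at hi
          · exact absurd hg (by simp)
      | cons d u' =>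
        have hdc : d ≠ c := by
          intro h; exact hu0 (by simp [h])
        rw [List.foldl_cons,
          show scanStep (false, some c, decide (k % 2 = 1)) d
            = (decide (d = '*') && decide (k % 2 = 1), some d, false) from by
            simp only [scanStep]
            rw [if_neg (fun h => hdc (Option.some.inj h).symm)]
            simp]
        rw [scan_flag u' (some d) false (decide (d = '*') && decide (k % 2 = 1))]
        have htail : (List.foldl scanStep (false, some d, false) u').1 = starScan (d :: u') := by
          rw [starScan, List.foldl_cons,
            show scanStep (false, none, false) d = (false, some d, false) from by
              simp [scanStep]]
        rw [htail]
        constructor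
        · intro h
          rcases (Bool.or_eq_true _ _).mp h with h1 | h2
          · have hd : d = '*' := of_decide_eq_true ((Bool.and_eq_true _ _).mp h1).1
            have hk : k % 2 = 1 := of_decide_eq_true ((Bool.and_eq_true _ _).mp h1).2
            right
            exact ⟨fun hcc => hdc (by rw [hd, hcc]), by omega, by simp [hd]⟩
          · exact Or.inl ((ih (d :: u') hulen).mp h2)
        · rintro (hC2 | ⟨hc, hpar, hg⟩)
          · exact (Bool.or_eq_true _ _).mpr (Or.inr ((ih (d :: u') hulen).mpr hC2))
          · apply (Bool.or_eq_true _ _).mpr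
            left
            have hd : d = '*' := Option.some.inj (by simpa using hg)
            have hk : k % 2 = 1 := by omega
            simp [hd, hk]

theorem D_count_iff (s : String) : D_count s ↔ Dl s.toList := by
  unfold D_count
  rw [Bool.or_eq_true]
  exact or_congr (infix3_iff s.toList) (scan_iff s.toList.length s.toList le_rfl)

-- ===== VERDICT (by name: the statement is the Claim_ definition above) =====
theorem count_spec : Claim_unchanged_count := by
  intro s _ hnD
  have h := KEY s.toList.length s.toList none le_rfl (by intro c _ _; simp)
  rw [count_eq_aGo]
  rw [count_alt_eq]
  show aGo none s.toList = bGo s.toList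
  exact h.2.mpr ⟨fun hd => hnD ((D_count_iff s).mpr hd), by simp⟩

theorem count_changed : Claim_changed_count := by
  unfold Claim_changed_count; decide

theorem count_tight : Claim_exact_count := by
  intro s _ hD
  have h := KEY s.toList.length s.toList none le_rfl (by intro c _ _; simp)
  rw [count_eq_aGo]
  rw [count_alt_eq]
  show aGo none s.toList ≠ bGo s.toList
  intro heq
  exact (h.2.mp heq).1 ((D_count_iff s).mp hD)
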